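-- pv_equiv track=rewrite | github.com/layter229/encrypt-info | lab1/6.py | zigzag_encrypt
-- ===== SOURCE A (Python) =====
-- def zigzag_encrypt(text):
--     # Убираем пробелы и переводим текст в верхний регистр
--     text = text.replace(" ", "").upper()
--
--     # Создаем массив для уровней
--     levels = [['' for _ in range(len(text))] for _ in range(2)]
--
--     # Переменные для направления записи
--     direction = 1  # 1 - вниз, -1 - вверх
--     current_level = 0
--     index = 0
--
--     # Записываем текст по уровням
--     for char in text:
--         levels[current_level][index] = char
--
--         # Меняем направление, если достигли верхнего или нижнего уровня
--         if current_level == 0: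
--             direction = 1
--         elif current_level == 2 - 1:
--             direction = -1
--
--         # Переход к следующему уровню
--         current_level += direction
--
--         # Увеличиваем индекс, если находимся на верхнем или нижнем уровне
--         if direction == 1 and current_level == 2 - 1:
--             index += 1
--         elif direction == -1 and current_level == 0:
--             index += 1
--
--     # Преобразуем уровни в строки и создаем зашифрованный текст
--     encrypted_text = [''.join(level) for level in levels]
--
--     return levels, encrypted_text
-- ===== SOURCE B (Python) =====
-- def zigzag_encrypt(text):
--     # Closed form: with 2 rails, character i always lands on rail i % 2 at column i.
--     text = text.replace(" ", "").upper()
--     levels = [[ch if i % 2 == r else '' for i, ch in enumerate(text)]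
--               for r in range(2)]
--     encrypted_text = [''.join(level) for level in levels]
--     return levels, encrypted_text
-- ===== Notes on version B (the rewrite author's own statement) =====
-- stated objective: simpler
-- what changed: Replaces the direction/current_level/index state machine writing into a pre-allocated grid by a closed-form parity comprehension: character i goes to rail i%2 at column i.
import Mathlib
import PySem

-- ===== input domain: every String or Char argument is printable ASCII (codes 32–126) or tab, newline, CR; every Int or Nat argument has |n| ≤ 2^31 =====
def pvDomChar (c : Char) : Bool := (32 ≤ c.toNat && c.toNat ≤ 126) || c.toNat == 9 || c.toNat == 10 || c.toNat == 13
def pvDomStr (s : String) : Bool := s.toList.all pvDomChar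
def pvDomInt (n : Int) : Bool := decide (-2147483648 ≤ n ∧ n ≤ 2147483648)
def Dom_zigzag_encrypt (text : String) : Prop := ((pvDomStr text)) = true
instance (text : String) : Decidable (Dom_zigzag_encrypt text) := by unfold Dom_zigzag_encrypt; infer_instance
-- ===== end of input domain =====

-- B replaces A's direction/current_level/index state machine by the closed form
-- "character i goes to rail i % 2 at column i" (objective: simpler).

-- ===== PORT A =====
-- levels[current_level][index] = char; .toNat is exact here: in A's loop current_level and
-- index are always ≥ 0 and in range (the loop lemma below proves exactly this shape).
def zzSet (ls : List (List String)) (r i : Int) (c : String) : List (List String) :=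
  ls.modify r.toNat (fun row => row.set i.toNat c)

def zzStep (st : List (List String) × Int × Int × Int) (c : Char) : List (List String) × Int × Int × Int :=
  match st with
  | (levels, direction, current_level, index) =>
    let levels := zzSet levels current_level index (String.ofList [c])
    let direction := if current_level = 0 then 1
                     else if current_level = 2 - 1 then -1 else direction
    let current_level := current_level + direction
    let index := if direction = 1 ∧ current_level = 2 - 1 then index + 1
                 else if direction = -1 ∧ current_level = 0 then index + 1 else index
    (levels, direction, current_level, index)

def zigzag_encrypt (text : String) : List (List String) × List String :=
  let text := PySem.Str.upper (PySem.Str.replace text " " "")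
  -- range(len(text)): Str.len is never negative, so .toNat is exact
  let levels : List (List String) :=
    (List.range 2).map (fun _ => (List.range (PySem.Str.len text).toNat).map (fun _ => ""))
  let st := text.toList.foldl zzStep (levels, 1, 0, 0)
  let levels := st.1
  let encrypted_text := levels.map (fun level => PySem.Str.join "" level)
  (levels, encrypted_text)

-- ===== PORT B =====
def zigzag_encrypt_alt (text : String) : List (List String) × List String :=
  let text := PySem.Str.upper (PySem.Str.replace text " " "")
  let levels : List (List String) :=
    (List.range 2).map (fun r =>
      (PySem.List.enumerate text.toList 0).map
        (fun p => if PySem.Int.mod p.1 2 = (r : Int) then String.ofList [p.2] else ""))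
  let encrypted_text := levels.map (fun level => PySem.Str.join "" level)
  (levels, encrypted_text)

-- ===== PRECONDITION & SPEC =====
def Spec_zigzag_encrypt (text : String) (out : List (List String) × List String) : Prop := out = zigzag_encrypt_alt text
instance (text : String) (out : List (List String) × List String) : Decidable (Spec_zigzag_encrypt text out) := by unfold Spec_zigzag_encrypt; infer_instance

-- ===== CLAIM (what is proved, stated in full; the proofs are below) =====
def Claim_equal_zigzag_encrypt : Prop := ∀ (text : String), Dom_zigzag_encrypt text → Spec_zigzag_encrypt text (zigzag_encrypt text)

-- ===== LEMMAS AND PROOFS =====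

-- Proof-side spec of A's writes: overwrite positions idx, idx+2, … of r when b, the odd ones when ¬b.
def setAlt (r : List String) (idx : Nat) (b : Bool) (cs : List Char) : List String :=
  match cs with
  | [] => r
  | c :: cs => setAlt (if b then r.set idx (String.ofList [c]) else r) (idx + 1) (!b) cs

lemma setAlt_getElem? : ∀ (cs : List Char) (r : List String) (idx : Nat) (b : Bool) (j : Nat),
    (setAlt r idx b cs)[j]? =
      if idx ≤ j ∧ j - idx < cs.length ∧ (j - idx) % 2 = (cond b 0 1) then
        (if j < r.length then some (String.ofList [cs.getD (j - idx) ' ']) else none)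
      else r[j]? := by
  intro cs
  induction cs with
  | nil =>
    intro r idx b j
    simp only [setAlt, List.length_nil]
    rw [if_neg (by omega)]
  | cons c tl ih =>
    intro r idx b j
    simp only [setAlt]
    rw [ih]
    have hlen : (if b = true then r.set idx (String.ofList [c]) else r).length = r.length := by
      cases b <;> simp
    have hget : (if b = true then r.set idx (String.ofList [c]) else r)[j]? =
        if b = true ∧ idx = j then (if idx < r.length then some (String.ofList [c]) else none)
        else r[j]? := by
      cases b with
      | false => simp
      | true => simp [List.getElem?_set]
    rw [hlen, hget]
    rcases Nat.lt_trichotomy j idx with hlt | heq | hgt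
    · -- j < idx : everything is untouched
      have n1 : ¬(idx + 1 ≤ j ∧ j - (idx + 1) < tl.length ∧ (j - (idx + 1)) % 2 = cond (!b) 0 1) := by
        rintro ⟨h, -⟩; omega
      have n3 : ¬(b = true ∧ idx = j) := by rintro ⟨-, h⟩; omega
      have n2 : ¬(idx ≤ j ∧ j - idx < (c :: tl).length ∧ (j - idx) % 2 = cond b 0 1) := by
        rintro ⟨h, -⟩; omega
      rw [if_neg n1, if_neg n3, if_neg n2]
    · -- j = idx : only the current write can matter
      subst heq
      cases b with
      | true =>
        have n1 : ¬(j + 1 ≤ j ∧ j - (j + 1) < tl.length ∧ (j - (j + 1)) % 2 = cond (!true) 0 1) := by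
          rintro ⟨h, -⟩; omega
        have p2 : j ≤ j ∧ j - j < (c :: tl).length ∧ (j - j) % 2 = cond true 0 1 :=
          ⟨le_refl _, by simp, by simp⟩
        rw [if_neg n1, if_pos ⟨rfl, rfl⟩, if_pos p2]
        simp
      | false =>
        have n1 : ¬(j + 1 ≤ j ∧ j - (j + 1) < tl.length ∧ (j - (j + 1)) % 2 = cond (!false) 0 1) := by
          rintro ⟨h, -⟩; omega
        have n3 : ¬(false = true ∧ j = j) := by rintro ⟨h, -⟩; exact Bool.false_ne_true h
        have n2 : ¬(j ≤ j ∧ j - j < (c :: tl).length ∧ (j - j) % 2 = cond false 0 1) := by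
          rintro ⟨-, -, h⟩; simp at h
        rw [if_neg n1, if_neg n3, if_neg n2]
    · -- idx < j : handled by the tail, with parity flipped
      have hxy : j - idx = (j - (idx + 1)) + 1 := by omega
      have hpar : ((j - (idx + 1)) % 2 = cond (!b) 0 1) ↔ ((j - idx) % 2 = cond b 0 1) := by
        cases b <;> simp <;> omega
      have n3 : ¬(b = true ∧ idx = j) := by rintro ⟨-, h⟩; omega
      by_cases hin : j - (idx + 1) < tl.length
      · by_cases hp : (j - (idx + 1)) % 2 = cond (!b) 0 1
        · have p1 : idx + 1 ≤ j ∧ j - (idx + 1) < tl.length ∧ (j - (idx + 1)) % 2 = cond (!b) 0 1 :=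
            ⟨by omega, hin, hp⟩
          have p2 : idx ≤ j ∧ j - idx < (c :: tl).length ∧ (j - idx) % 2 = cond b 0 1 :=
            ⟨by omega, by simp; omega, hpar.mp hp⟩
          rw [if_pos p1, if_pos p2, hxy, List.getD_cons_succ]
        · have n1 : ¬(idx + 1 ≤ j ∧ j - (idx + 1) < tl.length ∧ (j - (idx + 1)) % 2 = cond (!b) 0 1) := by
            rintro ⟨-, -, h⟩; exact hp h
          have n2 : ¬(idx ≤ j ∧ j - idx < (c :: tl).length ∧ (j - idx) % 2 = cond b 0 1) := by
            rintro ⟨-, -, h⟩; exact hp (hpar.mpr h)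
          rw [if_neg n1, if_neg n3, if_neg n2]
      · have n1 : ¬(idx + 1 ≤ j ∧ j - (idx + 1) < tl.length ∧ (j - (idx + 1)) % 2 = cond (!b) 0 1) := by
          rintro ⟨-, h, -⟩; exact hin h
        have n2 : ¬(idx ≤ j ∧ j - idx < (c :: tl).length ∧ (j - idx) % 2 = cond b 0 1) := by
          rintro ⟨-, h, -⟩; simp at h; omega
        rw [if_neg n1, if_neg n3, if_neg n2]

-- A's loop, fully symbolically: starting on rail 0 (resp. rail 1) at column idx with any
-- direction, the final grid is the alternating overwrite of each row.
lemma foldA : ∀ (cs : List Char) (r0 r1 : List String) (d : Int) (idx : Nat),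
    (∃ rest, cs.foldl zzStep ([r0, r1], d, 0, (idx : Int)) =
        ([setAlt r0 idx true cs, setAlt r1 idx false cs], rest))
    ∧
    (∃ rest, cs.foldl zzStep ([r0, r1], d, 1, (idx : Int)) =
        ([setAlt r0 idx false cs, setAlt r1 idx true cs], rest)) := by
  intro cs
  induction cs with
  | nil =>
    intro r0 r1 d idx
    exact ⟨⟨(d, 0, (idx : Int)), by simp [setAlt]⟩, ⟨(d, 1, (idx : Int)), by simp [setAlt]⟩⟩
  | cons c tl ih =>
    intro r0 r1 d idx
    constructor
    · -- current_level = 0 : write r0[idx], go to rail 1, index += 1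
      have hstep : zzStep ([r0, r1], d, 0, (idx : Int)) c =
          ([r0.set idx (String.ofList [c]), r1], 1, 1, ((idx + 1 : Nat) : Int)) := by
        simp [zzStep, zzSet, List.modify]
      rw [List.foldl_cons, hstep]
      obtain ⟨rest, hrest⟩ := (ih (r0.set idx (String.ofList [c])) r1 1 (idx + 1)).2
      exact ⟨rest, by rw [hrest]; simp [setAlt]⟩
    · -- current_level = 1 : write r1[idx], go to rail 0, index += 1
      have hstep : zzStep ([r0, r1], d, 1, (idx : Int)) c =
          ([r0, r1.set idx (String.ofList [c])], -1, 0, ((idx + 1 : Nat) : Int)) := by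
        simp [zzStep, zzSet, List.modify]
      rw [List.foldl_cons, hstep]
      obtain ⟨rest, hrest⟩ := (ih r0 (r1.set idx (String.ofList [c])) (-1) (idx + 1)).1
      exact ⟨rest, by rw [hrest]; simp [setAlt]⟩

-- A's filled row = B's parity comprehension over enumerate.
lemma row_eq (cs : List Char) (b : Bool) :
    setAlt (List.replicate cs.length "") 0 b cs =
      (PySem.List.enumerate cs 0).map
        (fun p => if PySem.Int.mod p.1 2 = (cond b 0 1) then String.ofList [p.2] else "") := by
  apply List.ext_getElem?
  intro j
  rw [setAlt_getElem?]
  simp only [Nat.sub_zero, List.length_replicate, List.getElem?_replicate,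
    List.getElem?_map, PySem.List.getElem?_enumerate, Nat.zero_le, true_and]
  by_cases hj : j < cs.length
  · have hcs : cs[j]? = some cs[j] := List.getElem?_eq_getElem hj
    have hmod : PySem.Int.mod ((0 : Int) + (j : Nat)) 2 = ((j % 2 : Nat) : Int) := by
      rw [zero_add]
      exact_mod_cast PySem.Int.mod_natCast j 2
    by_cases hp : j % 2 = cond b 0 1
    · rw [if_pos ⟨hj, hp⟩, if_pos hj, hcs]
      simp only [Option.map_some]
      rw [hmod]
      rw [if_pos (by cases b <;> simp_all)]
      simp [List.getD, hcs]
    · rw [if_neg (by rintro ⟨-, h⟩; exact hp h), if_pos hj, hcs]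
      simp only [Option.map_some]
      rw [hmod, if_neg (by cases b <;> simp_all)]
  · rw [if_neg (by rintro ⟨h, -⟩; exact hj h), if_neg hj,
        List.getElem?_eq_none (by simpa using hj)]
    rfl

-- The ports, compared after the shared normalisation: A's loop result is B's parity grid.
lemma core (u : String) :
    (u.toList.foldl zzStep
        ((List.range 2).map (fun _ => (List.range (PySem.Str.len u).toNat).map (fun _ => "")), 1, 0, 0)).1
      = (List.range 2).map (fun r =>
          (PySem.List.enumerate u.toList 0).map
            (fun p => if PySem.Int.mod p.1 2 = (r : Int) then String.ofList [p.2] else "")) := by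
  have hrep : (List.range (PySem.Str.len u).toNat).map (fun _ => ("" : String)) =
      List.replicate u.toList.length ("" : String) := by
    rw [PySem.Str.len_eq, Int.toNat_natCast]
    simp [List.map_const', List.length_range]
  obtain ⟨rest, hrest⟩ :=
    (foldA u.toList (List.replicate u.toList.length "") (List.replicate u.toList.length "") 1 0).1
  simp only [Nat.cast_zero] at hrest
  have hgrid : (List.range 2).map (fun _ => (List.range (PySem.Str.len u).toNat).map (fun _ => ("" : String)))
      = [List.replicate u.toList.length "", List.replicate u.toList.length ""] := by
    rw [show List.range 2 = [0, 1] from rfl, hrep]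
    rfl
  rw [hgrid, hrest]
  rw [show List.range 2 = [0, 1] from rfl]
  rw [row_eq u.toList true, row_eq u.toList false]
  rfl

-- ===== VERDICT (by name: the statement is the Claim_ definition above) =====
theorem zigzag_encrypt_spec : Claim_equal_zigzag_encrypt := by
  intro text _h
  unfold Spec_zigzag_encrypt zigzag_encrypt zigzag_encrypt_alt
  dsimp only
  rw [core]
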